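-- pv_equiv track=rewrite | github.com/Gallopsled/pwntools | pwnlib/util/cyclic.py | metasploit_pattern
-- ===== SOURCE A (Python) =====
-- import string
--
-- def metasploit_pattern(sets = None):
--     """metasploit_pattern(sets = [ string.ascii_uppercase, string.ascii_lowercase, string.digits ]) -> generator
--
--     Generator for a sequence of characters as per Metasploit Framework's
--     `Rex::Text.pattern_create` (aka `pattern_create.rb`).
--
--     The returned generator will yield up to
--     ``len(sets) * reduce(lambda x,y: x*y, map(len, sets))`` elements.
--
--     Arguments:
--         sets: List of strings to generate the sequence over.
--     """
--     sets = sets or [ string.ascii_uppercase, string.ascii_lowercase, string.digits ]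
--     offsets = [ 0 ] * len(sets)
--     offsets_indexes_reversed = list(reversed(range(len(offsets))))
--
--     while True:
--         for i, j in zip(sets, offsets):
--             yield i[j]
--         # increment offsets with cascade
--         for i in offsets_indexes_reversed:
--             offsets[i] = (offsets[i] + 1) % len(sets[i])
--             if offsets[i] != 0:
--                 break
--         # finish up if we've exhausted the sequence
--         if offsets == [ 0 ] * len(sets):
--             return
-- ===== SOURCE B (Python) =====
-- import string
--
-- def metasploit_pattern(sets = None):
--     """Recursive cartesian-product formulation: enumerate all index tuples as the
--     product of the sets (rightmost fastest) and flatten each combination."""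
--     sets = sets or [ string.ascii_uppercase, string.ascii_lowercase, string.digits ]
--
--     def combos(rest):
--         if not rest:
--             yield []
--         else:
--             for c in rest[0]:
--                 for tail in combos(rest[1:]):
--                     yield [c] + tail
--
--     for combo in combos(sets):
--         yield from combo
-- ===== Notes on version B (the rewrite author's own statement) =====
-- stated objective: alternative
-- what changed: Replaces the mutable-offsets odometer with cascade increment and wraparound termination by a recursive cartesian-product generator whose combinations are flattened in order.
-- crash fix: When the given sets list is nonempty and contains an empty string, A raises IndexError while iterating (after yielding the characters before it); B yields nothing, i.e. returns the empty sequence. — e.g. on metasploit_pattern(some ["A", ""]): A raises IndexError, B returns []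
import Mathlib
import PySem

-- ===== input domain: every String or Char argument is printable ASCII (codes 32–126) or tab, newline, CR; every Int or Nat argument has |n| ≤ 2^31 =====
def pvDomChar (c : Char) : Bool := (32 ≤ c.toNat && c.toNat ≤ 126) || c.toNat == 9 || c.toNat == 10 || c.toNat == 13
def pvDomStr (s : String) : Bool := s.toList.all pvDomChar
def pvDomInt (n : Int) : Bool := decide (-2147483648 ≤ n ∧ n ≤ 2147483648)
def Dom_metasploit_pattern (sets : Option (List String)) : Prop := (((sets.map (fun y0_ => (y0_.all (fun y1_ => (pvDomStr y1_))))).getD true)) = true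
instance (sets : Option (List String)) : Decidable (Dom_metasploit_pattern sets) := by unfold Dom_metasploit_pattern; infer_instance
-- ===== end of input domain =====

-- B replaces A's mutable-offsets odometer (cascade increment + wraparound test) by a recursive
-- cartesian product whose combinations are flattened; same output, no speed claim.
-- Both Pythons are generators; equivalence is about the full yielded sequence (as List String).

-- ===== PORT A =====
-- shared line `sets = sets or [string.ascii_uppercase, string.ascii_lowercase, string.digits]`
def pvOrDefault (sets : Option (List String)) : List String :=
  match sets with
  | none => ["ABCDEFGHIJKLMNOPQRSTUVWXYZ", "abcdefghijklmnopqrstuvwxyz", "0123456789"]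
  | some [] => ["ABCDEFGHIJKLMNOPQRSTUVWXYZ", "abcdefghijklmnopqrstuvwxyz", "0123456789"]
  | some l => l

-- `for i, j in zip(sets, offsets): yield i[j]` — i[j] via getD: every reachable offset is in
-- range on Pre_ (empty member strings, where Python raises IndexError, are excluded by Pre_)
def rowA (n : List (List Char)) (o : List Nat) : List Char :=
  (n.zip o).map (fun p => p.1.getD p.2 ' ')

-- `for i in offsets_indexes_reversed: offsets[i] = (offsets[i]+1) % len(sets[i]); if != 0: break`
-- processed from the right; the Bool is "the cascade is still running" (no break yet)
def cascA (n : List (List Char)) (o : List Nat) : List Nat × Bool :=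
  match n, o with
  | s :: n', j :: o' =>
      let p := cascA n' o'
      if p.2 then (((j + 1) % s.length) :: p.1, decide ((j + 1) % s.length = 0))
      else (j :: p.1, false)
  | _, _ => ([], true)

-- the `while True` loop; fuel = total number of iterations (= product of the set lengths)
def loopA (n : List (List Char)) : Nat → List Nat → List Char
  | 0, _ => []
  | f + 1, o =>
      rowA n o ++
        (let c := cascA n o
         if c.1 = List.replicate n.length 0 then [] else loopA n f c.1)

def metasploit_pattern (sets : Option (List String)) : List String :=
  (loopA ((pvOrDefault sets).map String.toList)
      ((((pvOrDefault sets).map String.toList).map List.length).prod)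
      (List.replicate ((pvOrDefault sets).map String.toList).length 0)).map
    (fun c => String.ofList [c])

-- ===== PORT B =====
-- `def combos(rest): …` — recursive cartesian product, rightmost fastest
def combosB : List (List Char) → List (List Char)
  | [] => [[]]
  | s :: rest => s.flatMap (fun c => (combosB rest).map (fun t => c :: t))

-- `for combo in combos(sets): yield from combo`
def metasploit_pattern_alt (sets : Option (List String)) : List String :=
  ((combosB ((pvOrDefault sets).map String.toList)).flatMap id).map (fun c => String.ofList [c])

-- ===== PRECONDITION & SPEC =====
-- Pre_ excludes exactly the inputs where A raises IndexError: a nonempty sets list containing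
-- an empty string (an empty member makes i[j] fail on the first pass).
def Pre_metasploit_pattern (sets : Option (List String)) : Prop :=
  ∀ s ∈ sets.getD [], ¬ s = ""
instance (sets : Option (List String)) : Decidable (Pre_metasploit_pattern sets) := by
  unfold Pre_metasploit_pattern; infer_instance

def pvWitness_metasploit_pattern : Option (List String) := some ["AB", "xy"]

-- When the given sets list is nonempty and contains an empty string, A raises IndexError while
-- iterating; B yields nothing, i.e. returns the empty sequence.
def Raises_metasploit_pattern (sets : Option (List String)) : Prop :=
  sets.getD [] ≠ [] ∧ "" ∈ sets.getD []
instance (sets : Option (List String)) : Decidable (Raises_metasploit_pattern sets) := by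
  unfold Raises_metasploit_pattern; infer_instance
def pvRaiseWitness_metasploit_pattern : Option (List String) := some ["A", ""]
def pvRaiseWitnessOut_metasploit_pattern : List String := []

def Spec_metasploit_pattern (sets : Option (List String)) (out : List String) : Prop := out = metasploit_pattern_alt sets
instance (sets : Option (List String)) (out : List String) : Decidable (Spec_metasploit_pattern sets out) := by unfold Spec_metasploit_pattern; infer_instance

-- ===== CLAIM (what is proved, stated in full; the proofs are below) =====
def Claim_equal_metasploit_pattern : Prop := ∀ (sets : Option (List String)), Dom_metasploit_pattern sets → Pre_metasploit_pattern sets → Spec_metasploit_pattern sets (metasploit_pattern sets)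
def Claim_raises_metasploit_pattern : Prop := (∀ (sets : Option (List String)), Dom_metasploit_pattern sets → Raises_metasploit_pattern sets → ¬ Pre_metasploit_pattern sets) ∧ (Dom_metasploit_pattern (pvRaiseWitness_metasploit_pattern) ∧ Raises_metasploit_pattern (pvRaiseWitness_metasploit_pattern) ∧ metasploit_pattern_alt (pvRaiseWitness_metasploit_pattern) = pvRaiseWitnessOut_metasploit_pattern)

-- ===== LEMMAS AND PROOFS =====

-- valid offsets: one in-range index per set
def ValidO (n : List (List Char)) (o : List Nat) : Prop :=
  List.Forall₂ (fun (s : List Char) (j : Nat) => j < s.length) n o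

-- "the odometer run from o wraps back to all-zero after exactly f iterations"
def wrapsA (n : List (List Char)) : Nat → List Nat → Prop
  | 0, _ => False
  | f + 1, o =>
      if (cascA n o).1 = List.replicate n.length 0 then f = 0 else wrapsA n f (cascA n o).1

lemma validO_zeros : ∀ (n : List (List Char)), (∀ t ∈ n, t ≠ []) →
    ValidO n (List.replicate n.length 0) := by
  intro n
  induction n with
  | nil => intro _; unfold ValidO; exact List.Forall₂.nil
  | cons s ls ih =>
      intro hn
      refine List.Forall₂.cons ?_ (ih (fun t ht => hn t (List.mem_cons_of_mem _ ht)))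
      exact List.length_pos_iff.mpr (hn s List.mem_cons_self)

lemma cascA_valid (n : List (List Char)) (o : List Nat) (hn : ∀ t ∈ n, t ≠ [])
    (h : ValidO n o) :
    ValidO n (cascA n o).1 ∧ ((cascA n o).2 = true ↔ (cascA n o).1 = List.replicate n.length 0) := by
  induction h with
  | nil =>
      refine ⟨?_, by simp [cascA]⟩
      unfold ValidO; exact List.Forall₂.nil
  | @cons s j ls o' hj _ ih =>
      have hs : 0 < s.length := List.length_pos_iff.mpr (hn s List.mem_cons_self)
      obtain ⟨ihv, ihw⟩ := ih (fun t ht => hn t (List.mem_cons_of_mem _ ht))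
      by_cases hw : (cascA ls o').2 = true
      · have hz : (cascA ls o').1 = List.replicate ls.length 0 := ihw.mp hw
        constructor
        · simp only [cascA, hw, if_true]
          exact List.Forall₂.cons (Nat.mod_lt _ hs) (hz ▸ ihv)
        · simp [cascA, hw, hz, List.replicate_succ]
      · have hz : ¬ (cascA ls o').1 = List.replicate ls.length 0 := fun h => hw (ihw.mpr h)
        constructor
        · simp only [cascA, hw]
          exact List.Forall₂.cons hj ihv
        · simp [cascA, hw, List.replicate_succ, hz]

lemma cascA_cons (s : List Char) (ls : List (List Char)) (j : Nat) (o : List Nat) :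
    cascA (s :: ls) (j :: o) =
      if (cascA ls o).2 then (((j + 1) % s.length) :: (cascA ls o).1, decide ((j + 1) % s.length = 0))
      else (j :: (cascA ls o).1, false) := rfl

-- chain of states visited by the while-loop
def chainA (n : List (List Char)) : Nat → List Nat → List (List Nat)
  | 0, _ => []
  | f + 1, o =>
      o :: (let c := cascA n o
            if c.1 = List.replicate n.length 0 then [] else chainA n f c.1)

lemma loopA_eq_chain (n : List (List Char)) :
    ∀ f o, loopA n f o = (chainA n f o).flatMap (rowA n) := by
  intro f
  induction f with
  | zero => intro o; simp [loopA, chainA]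
  | succ f ih =>
      intro o
      simp only [loopA, chainA]
      by_cases h : (cascA n o).1 = List.replicate n.length 0
      · simp [h]
      · simp [h, ih]

lemma chainA_succ (n : List (List Char)) (f : Nat) (o : List Nat) :
    chainA n (f + 1) o =
      o :: (if (cascA n o).1 = List.replicate n.length 0 then [] else chainA n f (cascA n o).1) := rfl

lemma wrapsA_succ (n : List (List Char)) (f : Nat) (o : List Nat) :
    wrapsA n (f + 1) o =
      if (cascA n o).1 = List.replicate n.length 0 then f = 0 else wrapsA n f (cascA n o).1 := rfl

-- main inner lemma: one full inner cycle with the head digit frozen at j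
lemma chainA_inner (s : List Char) (ls : List (List Char)) (hn : ∀ t ∈ ls, t ≠ []) :
    ∀ f o, ValidO ls o → wrapsA ls f o → ∀ (j m : Nat),
      chainA (s :: ls) (f + m) (j :: o) =
        (chainA ls f o).map (fun t => j :: t) ++
          (if (j + 1) % s.length = 0 then []
           else chainA (s :: ls) m (((j + 1) % s.length) :: List.replicate ls.length 0)) ∧
      ((if (j + 1) % s.length = 0 then m = 0
        else wrapsA (s :: ls) m (((j + 1) % s.length) :: List.replicate ls.length 0)) →
        wrapsA (s :: ls) (f + m) (j :: o)) := by
  intro f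
  induction f with
  | zero => intro o _ hw; exact absurd hw (by simp [wrapsA])
  | succ f ih =>
      intro o hv hw j m
      obtain ⟨hval, hwiff⟩ := cascA_valid ls o hn hv
      by_cases hz : (cascA ls o).1 = List.replicate ls.length 0
      · -- inner odometer wraps on this step
        have hw0 : f = 0 := by simpa [wrapsA_succ, hz] using hw
        subst hw0
        have hwT : (cascA ls o).2 = true := hwiff.mpr hz
        have hcomp : cascA (s :: ls) (j :: o) =
            (((j + 1) % s.length) :: List.replicate ls.length 0, decide ((j + 1) % s.length = 0)) := by
          rw [cascA_cons, if_pos hwT, hz]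
        have hfuel : 0 + 1 + m = m + 1 := by omega
        have hrhs : chainA ls (0 + 1) o = [o] := by
          rw [chainA_succ, if_pos hz]
        by_cases hj : (j + 1) % s.length = 0
        · have hrep : ((j + 1) % s.length) :: List.replicate ls.length 0 =
              List.replicate (s :: ls).length 0 := by
            simp [List.replicate_succ, hj]
          constructor
          · rw [hfuel, chainA_succ, hcomp, if_pos hrep, hrhs, if_pos hj]
            rfl
          · intro hm
            simp only [if_pos hj] at hm
            subst hm
            show wrapsA (s :: ls) (0 + 1) (j :: o)
            rw [wrapsA_succ, hcomp, if_pos hrep]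
        · have hrep : ¬ (((j + 1) % s.length) :: List.replicate ls.length 0 =
              List.replicate (s :: ls).length 0) := by
            simp [List.replicate_succ, hj]
          constructor
          · rw [hfuel, chainA_succ, hcomp, if_neg hrep, hrhs, if_neg hj]
            rfl
          · intro hm
            simp only [if_neg hj] at hm
            rw [hfuel, wrapsA_succ, hcomp, if_neg hrep]
            exact hm
      · -- inner odometer keeps going
        have hwF : (cascA ls o).2 = false := by
          cases h2 : (cascA ls o).2
          · rfl
          · exact absurd (hwiff.mp h2) hz
        have hw' : wrapsA ls f (cascA ls o).1 := by simpa [wrapsA_succ, hz] using hw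
        have hcomp : cascA (s :: ls) (j :: o) = (j :: (cascA ls o).1, false) := by
          rw [cascA_cons, hwF]; simp
        have hne : ¬ (j :: (cascA ls o).1 = List.replicate (s :: ls).length 0) := by
          simp only [List.length_cons, List.replicate_succ]
          intro h
          exact hz (List.cons_eq_cons.mp h).2
        obtain ⟨ihc, ihw⟩ := ih (cascA ls o).1 hval hw' j m
        have hfuel : f + 1 + m = (f + m) + 1 := by omega
        constructor
        · rw [hfuel, chainA_succ, hcomp, if_neg hne, ihc, chainA_succ, if_neg hz,
            List.map_cons, List.cons_append]
        · intro hm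
          rw [hfuel, wrapsA_succ, hcomp, if_neg hne]
          exact ihw hm

lemma drop_eq_getD_cons (s : List Char) (j : Nat) (hj : j < s.length) :
    s.drop j = s.getD j ' ' :: s.drop (j + 1) := by
  rw [List.getD_eq_getElem s ' ' hj]
  exact List.drop_eq_getElem_cons hj

-- the descending sweep of the head digit: j, j+1, …, |s|-1
lemma chainA_head (s : List Char) (ls : List (List Char)) (hn : ∀ t ∈ ls, t ≠ [])
    (hchain : (chainA ls ((ls.map List.length).prod) (List.replicate ls.length 0)).map (rowA ls)
      = combosB ls)
    (hwrap : wrapsA ls ((ls.map List.length).prod) (List.replicate ls.length 0)) :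
    ∀ k j, j + k = s.length → 0 < k →
      ((chainA (s :: ls) (k * (ls.map List.length).prod)
          (j :: List.replicate ls.length 0)).map (rowA (s :: ls))
        = (s.drop j).flatMap (fun c => (combosB ls).map (fun t => c :: t))) ∧
      wrapsA (s :: ls) (k * (ls.map List.length).prod) (j :: List.replicate ls.length 0) := by
  intro k
  induction k with
  | zero => intro j _ h0; exact absurd h0 (by omega)
  | succ k ih =>
      intro j hjk _
      have hj : j < s.length := by omega
      have hfuel : (k + 1) * (ls.map List.length).prod
          = (ls.map List.length).prod + k * (ls.map List.length).prod := by ring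
      obtain ⟨hc, hw⟩ := chainA_inner s ls hn ((ls.map List.length).prod)
        (List.replicate ls.length 0) (validO_zeros ls hn) hwrap j (k * (ls.map List.length).prod)
      rw [hfuel]
      by_cases hend : (j + 1) % s.length = 0
      · -- j is the last index of s
        have h1 : j + 1 = s.length := by
          rcases Nat.lt_or_ge (j + 1) s.length with h | h
          · rw [Nat.mod_eq_of_lt h] at hend; omega
          · omega
        have hk0 : k = 0 := by omega
        subst hk0
        rw [hc, if_pos hend]
        constructor
        · rw [List.append_nil, List.map_map]
          have hrow : ∀ t, rowA (s :: ls) (j :: t) = s.getD j ' ' :: rowA ls t := by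
            intro t; rfl
          have : (chainA ls ((ls.map List.length).prod) (List.replicate ls.length 0)).map
              ((rowA (s :: ls)) ∘ (fun t => j :: t))
              = (chainA ls ((ls.map List.length).prod) (List.replicate ls.length 0)).map
                (fun t => s.getD j ' ' :: rowA ls t) := by
            apply List.map_congr_left; intro t _; exact hrow t
          rw [this]
          have hdrop : s.drop j = [s.getD j ' '] := by
            rw [drop_eq_getD_cons s j hj, h1, List.drop_length]
          rw [hdrop]
          simp only [List.flatMap_cons, List.flatMap_nil, List.append_nil]
          rw [← hchain, List.map_map]
          rfl
        · exact hw (by simp [hend])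
      · -- j+1 is still a valid index
        have hlt : j + 1 < s.length := by
          rcases Nat.lt_or_ge (j + 1) s.length with h | h
          · exact h
          · exfalso
            have h1 : j + 1 = s.length := by omega
            rw [h1, Nat.mod_self] at hend
            exact hend rfl
        have hj1 : (j + 1) % s.length = j + 1 := Nat.mod_eq_of_lt hlt
        have hk : 0 < k := by omega
        obtain ⟨ihc, ihw⟩ := ih (j + 1) (by omega) hk
        rw [hc, if_neg hend, hj1]
        constructor
        · rw [List.map_append, ihc, List.map_map]
          have : (chainA ls ((ls.map List.length).prod) (List.replicate ls.length 0)).map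
              ((rowA (s :: ls)) ∘ (fun t => j :: t))
              = ((chainA ls ((ls.map List.length).prod) (List.replicate ls.length 0)).map
                (rowA ls)).map (fun t => s.getD j ' ' :: t) := by
            rw [List.map_map]; apply List.map_congr_left; intro t _; rfl
          rw [this, hchain, drop_eq_getD_cons s j hj, List.flatMap_cons]
        · exact hw (by rw [if_neg hend, hj1]; exact ihw)

-- grand induction: the whole while-loop chain, rows taken, is the cartesian product
lemma chainA_main : ∀ (n : List (List Char)), (∀ t ∈ n, t ≠ []) →
    ((chainA n ((n.map List.length).prod) (List.replicate n.length 0)).map (rowA n)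
      = combosB n) ∧
    wrapsA n ((n.map List.length).prod) (List.replicate n.length 0) := by
  intro n
  induction n with
  | nil =>
      intro _
      constructor
      · simp [chainA, cascA, combosB, rowA]
      · simp [wrapsA, cascA]
  | cons s ls ih =>
      intro hn
      have hs : 0 < s.length :=
        List.length_pos_iff.mpr (hn s List.mem_cons_self)
      obtain ⟨hchain, hwrap⟩ := ih (fun t ht => hn t (List.mem_cons_of_mem _ ht))
      obtain ⟨h1, h2⟩ := chainA_head s ls (fun t ht => hn t (List.mem_cons_of_mem _ ht))
        hchain hwrap s.length 0 (by omega) hs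
      constructor
      · rw [show ((s :: ls).map List.length).prod = s.length * (ls.map List.length).prod by simp,
          show List.replicate (s :: ls).length 0 = 0 :: List.replicate ls.length 0 by simp [List.replicate_succ]]
        rw [h1, List.drop_zero]
        rfl
      · rw [show ((s :: ls).map List.length).prod = s.length * (ls.map List.length).prod by simp,
          show List.replicate (s :: ls).length 0 = 0 :: List.replicate ls.length 0 by simp [List.replicate_succ]]
        exact h2

lemma loopA_main (n : List (List Char)) (hn : ∀ t ∈ n, t ≠ []) :
    loopA n ((n.map List.length).prod) (List.replicate n.length 0) = (combosB n).flatMap id := by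
  rw [loopA_eq_chain]
  rw [List.flatMap_def, (chainA_main n hn).1]
  simp

-- ===== VERDICT (by name: the statement is the Claim_ definition above) =====
theorem metasploit_pattern_spec : Claim_equal_metasploit_pattern := by
  intro sets _ hpre
  show metasploit_pattern sets = metasploit_pattern_alt sets
  unfold metasploit_pattern metasploit_pattern_alt
  have hne : ∀ t ∈ (pvOrDefault sets).map String.toList, t ≠ [] := by
    intro t ht
    simp only [List.mem_map] at ht
    obtain ⟨u, hu, rfl⟩ := ht
    intro hnil
    have hu' : u = "" := by
      have := congrArg String.ofList hnil
      simpa using this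
    subst hu'
    match sets, hu with
    | none, hu => simp [pvOrDefault] at hu
    | some [], hu => simp [pvOrDefault] at hu
    | some (x :: xs), hu =>
        exact hpre "" (by simpa [pvOrDefault] using hu) rfl
  rw [loopA_main _ hne]

@[simp] theorem metasploit_pattern_raises : Claim_raises_metasploit_pattern := by
  unfold Claim_raises_metasploit_pattern
  constructor
  · intro sets _ hr hpre
    obtain ⟨_, hmem⟩ := hr
    exact hpre "" hmem rfl
  · exact ⟨by decide, by decide, by decide⟩
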